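-- pv_equiv track=rewrite | github.com/vbshuliar/Programming_Projects_and_Labs_from_Ukrainian_Catholic_University | 01/programming/labs/05/06_07/acronym.py | create_acronym
-- ===== SOURCE A (Python) =====
-- def create_acronym(message):
--     """creates acronym from message
--     (str) -> str
--     >>> create_acronym("Hello World")
--     'HW - Hello World'
--     """
--     result = ""
--     message = message.split(sep="\n")
--     final_result = ""
--     for amount in range(len(message)):
--         temp = message[amount]
--         temp = temp.split(sep=' ')
--         for first_letter in range(len(temp)):
--             temp2 = temp[first_letter]
--             temp2 = temp2[:1]
--             result = result + temp2
--         result = result + " "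
--     result = result.upper()
--     result = result.split(sep=" ")
--     result = result[:-1]
--     for lines in range(len(result)):
--         result[lines] = result[lines] + " - " + message[lines]
--         if lines < len(result)-1:
--             final_result = final_result + result[lines] + "\n"
--         else:
--             final_result = final_result + result[lines]
--     return final_result
-- ===== SOURCE B (Python) =====
-- def create_acronym(message):
--     """creates acronym from message
--     (str) -> str
--     >>> create_acronym("Hello World")
--     'HW - Hello World'
--     """
--     entries = []
--     for line in message.split("\n"):
--         acronym = "".join(word[:1] for word in line.split(" ")).upper()
--         entries.append(acronym + " - " + line)
--     return "\n".join(entries)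
-- ===== Notes on version B (the rewrite author's own statement) =====
-- stated objective: simpler
-- what changed: One direct pass per line building each formatted entry immediately, instead of A's serialize-all-acronyms-into-one-space-joined-string, re-split, slice, and second index loop with in-place list mutation.
import Mathlib
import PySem

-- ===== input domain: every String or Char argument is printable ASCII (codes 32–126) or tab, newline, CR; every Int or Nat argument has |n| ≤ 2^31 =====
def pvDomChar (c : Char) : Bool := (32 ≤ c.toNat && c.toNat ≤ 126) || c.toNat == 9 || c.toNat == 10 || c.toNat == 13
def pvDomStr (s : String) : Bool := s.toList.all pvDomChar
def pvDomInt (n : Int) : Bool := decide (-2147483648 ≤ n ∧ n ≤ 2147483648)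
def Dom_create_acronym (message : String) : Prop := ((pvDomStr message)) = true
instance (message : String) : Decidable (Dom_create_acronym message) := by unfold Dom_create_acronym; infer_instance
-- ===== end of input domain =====

-- B builds each line's "ACRONYM - line" entry directly in one pass per line, instead of A's
-- serialize-all-acronyms-to-one-string / re-split / slice / second index loop with list mutation.


-- ===== PORT A =====
def create_acronym (message : String) : String :=
  -- message = message.split(sep="\n")
  let msg := PySem.Chars.splitOn message.toList ['\n']
  -- result = ""; for amount in range(len(message)): temp = message[amount].split(' ');
  --   for first_letter in range(len(temp)): result = result + temp[first_letter][:1]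
  --   result = result + " "
  let result : List Char :=
    (PySem.List.pyRange 0 (PySem.List.len msg)).foldl
      (fun result amount =>
        ((PySem.List.pyRange 0 (PySem.List.len (PySem.Chars.splitOn (PySem.List.pyGetD msg amount []) [' ']))).foldl
          (fun result first_letter =>
            result ++ PySem.List.slice
              (PySem.List.pyGetD (PySem.Chars.splitOn (PySem.List.pyGetD msg amount []) [' ']) first_letter [])
              none (some 1))
          result) ++ [' '])
      []
  -- result = result.upper(); result = result.split(sep=" "); result = result[:-1]
  let result := PySem.Chars.upper result
  let result := PySem.Chars.splitOn result [' ']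
  let result := PySem.List.slice result none (some (-1))
  -- for lines in range(len(result)): result[lines] = result[lines] + " - " + message[lines];
  --   final_result += result[lines] (+ "\n" unless last)
  let st :=
    (PySem.List.pyRange 0 (PySem.List.len result)).foldl
      (fun (st : List (List Char) × List Char) lines =>
        let entry := PySem.List.pyGetD st.1 lines [] ++ (' ' :: '-' :: ' ' :: []) ++ PySem.List.pyGetD msg lines []
        let r := st.1.set lines.toNat entry
        (r, if lines < PySem.List.len r - 1
            then st.2 ++ PySem.List.pyGetD r lines [] ++ ['\n']
            else st.2 ++ PySem.List.pyGetD r lines []))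
      (result, [])
  String.ofList st.2

-- ===== PORT B =====
-- acronym = "".join(word[:1] for word in line.split(" ")).upper()
def acronym_of_line (line : List Char) : List Char :=
  PySem.Chars.upper
    (PySem.Chars.join [] ((PySem.Chars.splitOn line [' ']).map (fun w => PySem.List.slice w none (some 1))))

def create_acronym_alt (message : String) : String :=
  -- entries = [acronym + " - " + line for line in message.split("\n")]; return "\n".join(entries)
  let entries := (PySem.Chars.splitOn message.toList ['\n']).map
    (fun line => acronym_of_line line ++ (' ' :: '-' :: ' ' :: []) ++ line)
  String.ofList (PySem.Chars.join ['\n'] entries)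

-- ===== PRECONDITION & SPEC =====
def Spec_create_acronym (message : String) (out : String) : Prop := out = create_acronym_alt message
instance (message : String) (out : String) : Decidable (Spec_create_acronym message out) := by unfold Spec_create_acronym; infer_instance

-- ===== CLAIM (what is proved, stated in full; the proofs are below) =====
def Claim_equal_create_acronym : Prop := ∀ (message : String), Dom_create_acronym message → Spec_create_acronym message (create_acronym message)

-- ===== LEMMAS AND PROOFS =====

lemma join_nil_flatten (ps : List (List Char)) : PySem.Chars.join [] ps = ps.flatten := by
  simp only [PySem.Chars.join, List.intercalate]
  induction ps with
  | nil => rfl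
  | cons a l ih => cases l <;> simp_all [List.intersperse]

lemma go_nil (sep : List Char) (fuel : Nat) (cur : List Char) (acc : List (List Char)) :
    PySem.Chars.splitOn.go sep fuel [] cur acc = (cur.reverse :: acc).reverse := by
  rw [PySem.Chars.splitOn.go.eq_def]
  cases fuel <;> simp

lemma go_consume (c : Char) (p : List Char) :
    ∀ (fuel : Nat) (cur rest : List Char) (acc : List (List Char)), c ∉ p → p.length ≤ fuel →
    PySem.Chars.splitOn.go [c] fuel (p ++ rest) cur acc
      = PySem.Chars.splitOn.go [c] (fuel - p.length) rest (p.reverse ++ cur) acc := by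
  induction p with
  | nil => intro fuel cur rest acc _ _; simp
  | cons a p ih =>
    intro fuel cur rest acc hnm hle
    have ha : (c == a) = false := by
      simp only [beq_eq_false_iff_ne]; intro h; exact hnm (h ▸ List.mem_cons_self)
    obtain ⟨f, rfl⟩ : ∃ f, fuel = f + 1 := ⟨fuel - 1, by simp at hle; omega⟩
    rw [List.cons_append, PySem.Chars.splitOn.go.eq_def]
    simp only [List.isPrefixOf, ha, Bool.false_and]
    rw [ih f (a :: cur) rest acc (fun h => hnm (List.mem_cons_of_mem a h)) (by simp at hle; omega)]
    simp

lemma go_intercalate (c : Char) :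
    ∀ (ps : List (List Char)) (fuel : Nat) (acc : List (List Char)), ps ≠ [] →
    (∀ q ∈ ps, c ∉ q) → ([c].intercalate ps).length ≤ fuel →
    PySem.Chars.splitOn.go [c] fuel ([c].intercalate ps) [] acc = acc.reverse ++ ps := by
  intro ps
  induction ps with
  | nil => intro _ _ h; exact absurd rfl h
  | cons p ps ih =>
    intro fuel acc _ hfree hlen
    cases ps with
    | nil =>
      simp only [show [c].intercalate [p] = p from by simp [List.intercalate]] at *
      rw [show p = p ++ [] from by simp, go_consume c p fuel [] [] acc
        (hfree p List.mem_cons_self) hlen, go_nil]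
      simp
    | cons q ps' =>
      have hJ : [c].intercalate (p :: q :: ps') = p ++ [c] ++ [c].intercalate (q :: ps') :=
        PySem.Chars.join_cons_cons [c] p q ps'
      rw [hJ] at hlen ⊢
      have hfp : c ∉ p := hfree p List.mem_cons_self
      simp only [List.length_append, List.length_cons, List.append_assoc, List.cons_append, List.nil_append] at hlen ⊢
      rw [go_consume c p fuel [] (c :: [c].intercalate (q :: ps')) acc hfp (by omega)]
      obtain ⟨f, hf⟩ : ∃ f, fuel - p.length = f + 1 := ⟨fuel - p.length - 1, by omega⟩
      rw [hf, PySem.Chars.splitOn.go.eq_def]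
      simp only [List.isPrefixOf, beq_self_eq_true, Bool.true_and, if_true, List.length_cons,
        List.length_nil, List.drop_succ_cons, List.drop_zero, List.append_nil,
        List.reverse_reverse]
      rw [ih f (p :: acc) (by simp) (fun q hq => hfree q (List.mem_cons_of_mem p hq)) (by omega)]
      simp

lemma splitOn_intercalate_single (c : Char) (ps : List (List Char)) (hne : ps ≠ [])
    (hfree : ∀ q ∈ ps, c ∉ q) :
    PySem.Chars.splitOn ([c].intercalate ps) [c] = ps := by
  rw [PySem.Chars.splitOn.eq_def, go_intercalate c ps _ [] hne hfree (by omega)]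
  simp

lemma go_sep_free (c : Char) :
    ∀ (fuel : Nat) (l cur : List Char) (acc : List (List Char)), c ∉ cur → (∀ q ∈ acc, c ∉ q) →
    l.length ≤ fuel → ∀ q ∈ PySem.Chars.splitOn.go [c] fuel l cur acc, c ∉ q := by
  intro fuel
  induction fuel with
  | zero =>
    intro l cur acc hcur hacc hlen
    have : l = [] := List.length_eq_zero_iff.mp (Nat.le_zero.mp hlen)
    subst this
    rw [PySem.Chars.splitOn.go.eq_def]
    simp only [List.append_nil, List.mem_reverse, List.mem_cons]
    rintro q (rfl | hq)
    · simpa using hcur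
    · exact hacc q hq
  | succ f ih =>
    intro l cur acc hcur hacc hlen
    cases l with
    | nil =>
      rw [go_nil]
      simp only [List.mem_reverse, List.mem_cons]
      rintro q (rfl | hq)
      · simpa using hcur
      · exact hacc q hq
    | cons a rest =>
      rw [PySem.Chars.splitOn.go.eq_def]
      simp only [List.isPrefixOf, Bool.and_true]
      by_cases hca : (c == a) = true
      · simp only [hca, if_true, List.length_cons, List.length_nil, List.drop_succ_cons,
          List.drop_zero]
        refine ih rest [] (cur.reverse :: acc) (by simp) ?_ (by simp at hlen; omega)
        intro q hq
        rcases List.mem_cons.mp hq with rfl | hq'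
        · simpa using hcur
        · exact hacc q hq'
      · simp only [hca, if_false, Bool.false_eq_true]
        refine ih rest (a :: cur) acc ?_ hacc (by simp at hlen; omega)
        intro hmem
        rcases List.mem_cons.mp hmem with rfl | hq'
        · simp at hca
        · exact hcur hq'

lemma splitOn_sep_free (c : Char) (s : List Char) : ∀ q ∈ PySem.Chars.splitOn s [c], c ∉ q := by
  rw [PySem.Chars.splitOn.eq_def]
  exact go_sep_free c (s.length + 1) s [] [] (by simp) (by simp) (by omega)

lemma flatMap_concat_intercalate (c : Char) (f : List Char → List Char) (ls : List (List Char)) :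
    ls.flatMap (fun l => f l ++ [c]) = [c].intercalate (ls.map f ++ [[]]) := by
  induction ls with
  | nil => simp [List.intercalate]
  | cons a l ih =>
    have hJ : [c].intercalate (f a :: (l.map f ++ [[]]))
        = f a ++ [c] ++ [c].intercalate (l.map f ++ [[]]) := by
      cases l with
      | nil => simp [List.intercalate]
      | cons b l' => exact PySem.Chars.join_cons_cons [c] (f a) (f b) (l'.map f ++ [[]])
    simp [ih, hJ]

def entryE (ps ls : List (List Char)) (j : Nat) : List Char :=
  ps.getD j [] ++ (' ' :: '-' :: ' ' :: []) ++ ls.getD j []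

lemma entries_map (U : List Char → List Char) (ms : List (List Char)) :
    (List.range' 0 ms.length).map (entryE (ms.map U) ms)
      = ms.map (fun l => U l ++ (' ' :: '-' :: ' ' :: []) ++ l) := by
  apply List.ext_getElem
  · simp
  · intro i h1 h2
    have hi : i < ms.length := by simpa using h2
    simp only [List.getElem_map, List.getElem_range', entryE, Nat.zero_add, Nat.one_mul]
    rw [List.getD_eq_getElem _ _ (by simpa using hi), List.getD_eq_getElem _ _ hi]
    simp

lemma pyRange_empty {k n : Nat} (h : n ≤ k) : PySem.List.pyRange (k : Int) (n : Int) = [] := by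
  simp [PySem.List.pyRange]; omega

lemma join_cons_of_ne_nil (sep a : List Char) (l : List (List Char)) (h : l ≠ []) :
    PySem.Chars.join sep (a :: l) = a ++ sep ++ PySem.Chars.join sep l := by
  cases l with
  | nil => exact absurd rfl h
  | cons b l' => exact PySem.Chars.join_cons_cons sep a b l'

def stepF (ls : List (List Char)) (st : List (List Char) × List Char) (lines : Int) :
    List (List Char) × List Char :=
  let entry := PySem.List.pyGetD st.1 lines [] ++ (' ' :: '-' :: ' ' :: []) ++ PySem.List.pyGetD ls lines []
  let r := st.1.set lines.toNat entry
  (r, if lines < PySem.List.len r - 1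
      then st.2 ++ PySem.List.pyGetD r lines [] ++ ['\n']
      else st.2 ++ PySem.List.pyGetD r lines [])

lemma loopA (ls ps : List (List Char)) (n : Nat) :
    ∀ (m k : Nat) (r : List (List Char)) (acc : List Char), m = n - k →
    r.length = n → (∀ j, k ≤ j → r.getD j [] = ps.getD j []) →
    ((PySem.List.pyRange (k : Int) (n : Int)).foldl (stepF ls) (r, acc)).2
    = acc ++ PySem.Chars.join ['\n'] ((List.range' k (n - k)).map (entryE ps ls)) := by
  intro m
  induction m with
  | zero =>
    intro k r acc hm hr _
    rw [pyRange_empty (by omega), show n - k = 0 from by omega]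
    simp [PySem.Chars.join_nil]
  | succ m ih =>
    intro k r acc hm hr hinv
    have hkn : k < n := by omega
    rw [PySem.List.pyRange_one_cons (by exact_mod_cast hkn), List.foldl_cons]
    have hgetr : PySem.List.pyGetD r (k : Int) [] = ps.getD k [] := by
      rw [PySem.List.pyGetD_natCast]; exact hinv k le_rfl
    have hset : (r.set (Int.toNat (k : Int)) (entryE ps ls k)).length = n := by
      simp [hr]
    have hget' : PySem.List.pyGetD (r.set (Int.toNat (k : Int)) (entryE ps ls k)) (k : Int) []
        = entryE ps ls k := by
      rw [PySem.List.pyGetD_natCast]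
      simp only [Int.toNat_natCast]
      rw [List.getD_eq_getElem _ _ (by simp; omega)]
      simp
    have hls : PySem.List.pyGetD ls (k : Int) [] = ls.getD k [] := PySem.List.pyGetD_natCast ls k []
    have hentry : PySem.List.pyGetD r (k : Int) [] ++ (' ' :: '-' :: ' ' :: []) ++ PySem.List.pyGetD ls (k : Int) []
        = entryE ps ls k := by rw [hgetr, hls]; rfl
    have hstep : stepF ls (r, acc) (k : Int)
        = (r.set (Int.toNat (k : Int)) (entryE ps ls k),
           if k + 1 < n then acc ++ entryE ps ls k ++ ['\n'] else acc ++ entryE ps ls k) := by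
      unfold stepF
      simp only [hentry, hget', PySem.List.len, hset]
      by_cases hc : k + 1 < n
      · rw [if_pos (by omega), if_pos hc]
      · rw [if_neg (by omega), if_neg hc]
    rw [hstep]
    have hinv' : ∀ j, k + 1 ≤ j →
        (r.set (Int.toNat (k : Int)) (entryE ps ls k)).getD j [] = ps.getD j [] := by
      intro j hj
      rw [List.getD_eq_getElem?_getD, List.getD_eq_getElem?_getD (l := ps),
        List.getElem?_set_ne (by simp; omega)]
      rw [← List.getD_eq_getElem?_getD, ← List.getD_eq_getElem?_getD]
      exact hinv j (by omega)
    have hcast : (k : Int) + 1 = ((k + 1 : Nat) : Int) := by push_cast; ring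
    by_cases hc : k + 1 < n
    · rw [if_pos hc, hcast, ih (k + 1) _ _ (by omega) hset hinv']
      have h1 : n - k = (n - k - 1) + 1 := by omega
      rw [h1, List.range'_succ, List.map_cons,
        join_cons_of_ne_nil _ _ _ (by simp [List.range'_eq_nil_iff]; omega)]
      simp only [List.append_assoc, ← Nat.sub_sub]
    · rw [if_neg hc, hcast, pyRange_empty (by omega)]
      have h1 : n - k = 1 := by omega
      rw [h1, List.foldl_nil]
      simp [PySem.Chars.join_singleton]

def acrA (l : List Char) : List Char :=
  (PySem.Chars.splitOn l [' ']).flatMap (fun w => PySem.List.slice w none (some 1))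

lemma toNat_ofNat_small (m : Nat) (h : m < 0xd800) : (Char.ofNat m).toNat = m := by
  unfold Char.ofNat Char.toNat
  rw [dif_pos (Or.inl h : m.isValidChar)]
  simp [Char.ofNatAux, UInt32.toNat_ofNatLT]

lemma upperChar_ne_space {x : Char} (h : x ≠ ' ') : PySem.Chars.upperChar x ≠ ' ' := by
  unfold PySem.Chars.upperChar PySem.Chars.islower
  split_ifs with hl
  · simp only [Bool.and_eq_true, decide_eq_true_eq] at hl
    have h1 : 97 ≤ x.toNat := hl.1
    have h2 : x.toNat ≤ 122 := hl.2
    intro hc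
    have := congrArg Char.toNat hc
    rw [toNat_ofNat_small _ (by omega)] at this
    have hsp : (' ' : Char).toNat = 32 := rfl
    omega
  · exact h

lemma acrA_space_free (l : List Char) : ' ' ∉ PySem.Chars.upper (acrA l) := by
  intro hmem
  simp only [PySem.Chars.upper, List.mem_map] at hmem
  obtain ⟨x, hx, hux⟩ := hmem
  have hxs : x = ' ' := by
    by_contra hne
    exact upperChar_ne_space hne hux
  subst hxs
  simp only [acrA, List.mem_flatMap] at hx
  obtain ⟨w, hw, hsw⟩ := hx
  rw [PySem.List.slice_to w (by norm_num)] at hsw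
  exact splitOn_sep_free ' ' l w hw (List.mem_of_mem_take hsw)

lemma create_acronym_eq (message : String) :
    create_acronym message = create_acronym_alt message := by
  unfold create_acronym create_acronym_alt acronym_of_line
  have step_inner : ∀ (t : List Char) (r : List Char),
      (PySem.List.pyRange 0 (PySem.List.len (PySem.Chars.splitOn t [' ']))).foldl
        (fun result first_letter =>
          result ++ PySem.List.slice
            (PySem.List.pyGetD (PySem.Chars.splitOn t [' ']) first_letter []) none (some 1))
        r = r ++ acrA t := by
    intro t r
    rw [PySem.List.foldl_pyRange_pyGetD (PySem.Chars.splitOn t [' ']) []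
      (fun r w => r ++ PySem.List.slice w none (some 1)) r (le_refl 0)]
    simp [acrA, List.flatMap_def]
  have houter : (fun (result : List Char) (amount : Int) =>
      ((PySem.List.pyRange 0 (PySem.List.len (PySem.Chars.splitOn (PySem.List.pyGetD (PySem.Chars.splitOn message.toList ['\n']) amount []) [' ']))).foldl
        (fun result first_letter => result ++ PySem.List.slice (PySem.List.pyGetD (PySem.Chars.splitOn (PySem.List.pyGetD (PySem.Chars.splitOn message.toList ['\n']) amount []) [' ']) first_letter []) none (some 1)) result) ++ [' '])
      = fun result amount => result ++ (acrA (PySem.List.pyGetD (PySem.Chars.splitOn message.toList ['\n']) amount []) ++ [' ']) := by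
    funext r a
    rw [step_inner]
    simp [List.append_assoc]
  simp only [houter]
  rw [PySem.List.foldl_pyRange_pyGetD (PySem.Chars.splitOn message.toList ['\n']) []
    (fun r l => r ++ (acrA l ++ [' '])) [] (le_refl 0),
    PySem.List.foldl_append_eq_flatMap (fun l => acrA l ++ [' '])]
  -- upper distributes
  have hupper : PySem.Chars.upper
      ([] ++ (PySem.Chars.splitOn message.toList ['\n']).flatMap (fun l => acrA l ++ [' ']))
      = (PySem.Chars.splitOn message.toList ['\n']).flatMap
          (fun l => PySem.Chars.upper (acrA l) ++ [' ']) := by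
    simp [PySem.Chars.upper, List.map_flatMap, show PySem.Chars.upperChar ' ' = ' ' from rfl]
    -- collapse A's serialize/re-split/slice stage
  simp only [Int.toNat_zero, List.drop_zero]
  rw [hupper, flatMap_concat_intercalate ' ' (fun l => PySem.Chars.upper (acrA l))]
  rw [splitOn_intercalate_single ' '
      ((PySem.Chars.splitOn message.toList ['\n']).map (fun l => PySem.Chars.upper (acrA l)) ++ [[]])
      (by simp) ?hfree]
  case hfree =>
    intro q hq
    rcases List.mem_append.mp hq with h | h
    · obtain ⟨l, _, rfl⟩ := List.mem_map.mp h
      exact acrA_space_free l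
    · simp at h; subst h; simp
  rw [PySem.List.slice_to_neg_one, List.dropLast_concat]
  have hfun : (fun (st : List (List Char) × List Char) (lines : Int) =>
      (st.1.set lines.toNat
          (PySem.List.pyGetD st.1 lines [] ++ [' ', '-', ' '] ++
            PySem.List.pyGetD (PySem.Chars.splitOn message.toList ['\n']) lines []),
        if lines <
            PySem.List.len
                (st.1.set lines.toNat
                  (PySem.List.pyGetD st.1 lines [] ++ [' ', '-', ' '] ++
                    PySem.List.pyGetD (PySem.Chars.splitOn message.toList ['\n']) lines [])) - 1 then
          st.2 ++
              PySem.List.pyGetD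
                (st.1.set lines.toNat
                  (PySem.List.pyGetD st.1 lines [] ++ [' ', '-', ' '] ++
                    PySem.List.pyGetD (PySem.Chars.splitOn message.toList ['\n']) lines []))
                lines [] ++ ['\n']
        else
          st.2 ++
            PySem.List.pyGetD
              (st.1.set lines.toNat
                (PySem.List.pyGetD st.1 lines [] ++ [' ', '-', ' '] ++
                  PySem.List.pyGetD (PySem.Chars.splitOn message.toList ['\n']) lines []))
              lines []))
      = stepF (PySem.Chars.splitOn message.toList ['\n']) := rfl
  rw [hfun]
  have hzero : (0 : Int) = ((0 : Nat) : Int) := rfl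
  have hlen : PySem.List.len
      (List.map (fun l => PySem.Chars.upper (acrA l)) (PySem.Chars.splitOn message.toList ['\n']))
      = (((List.map (fun l => PySem.Chars.upper (acrA l)) (PySem.Chars.splitOn message.toList ['\n'])).length : Nat) : Int) := rfl
  rw [hzero, hlen, loopA (PySem.Chars.splitOn message.toList ['\n'])
    (List.map (fun l => PySem.Chars.upper (acrA l)) (PySem.Chars.splitOn message.toList ['\n']))
    _ _ 0 _ [] rfl rfl (fun _ _ => rfl)]
  rw [Nat.sub_zero, List.length_map, entries_map (fun l => PySem.Chars.upper (acrA l))]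
  simp only [List.nil_append, acrA, List.flatMap_def, join_nil_flatten]

-- ===== VERDICT (by name: the statement is the Claim_ definition above) =====
theorem create_acronym_spec : Claim_equal_create_acronym := by
  intro message _
  unfold Spec_create_acronym
  exact create_acronym_eq message
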